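-- pv_equiv track=rewrite | github.com/AI-student2024/rag-project01-framework | backend/services/loading_service.py | _chunk_text_by_title
-- ===== SOURCE A (Python) =====
-- def _chunk_text_by_title(text: str) -> list:
--     """
--     按标题分块文本。
--
--     参数:
--         text (str): 要分块的文本
--
--     返回:
--         list: 分块后的文本列表
--     """
--     # 简单的标题识别规则
--     lines = text.split('\n')
--     chunks = []
--     current_chunk = []
--
--     for line in lines:
--         line = line.strip()
--         if not line:
--             continue
--
--         # 假设标题是短行且以数字和点开头
--         if len(line) < 100 and (line[0].isdigit() or line.isupper()):
--             if current_chunk: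
--                 chunks.append('\n'.join(current_chunk))
--                 current_chunk = []
--         current_chunk.append(line)
--
--     if current_chunk:
--         chunks.append('\n'.join(current_chunk))
--
--     return chunks
-- ===== SOURCE B (Python) =====
-- def _chunk_text_by_title(text: str) -> list:
--     # Different decomposition: first build the cleaned line list, then
--     # group it by spans that run from each line up to (not including)
--     # the next title line.
--     cleaned = [s for s in (line.strip() for line in text.split('\n')) if s]
--
--     def is_title(line):
--         return len(line) < 100 and (line[0].isdigit() or line.isupper())
--
--     chunks = []
--     i, n = 0, len(cleaned)
--     while i < n:
--         j = i + 1
--         while j < n and not is_title(cleaned[j]):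
--             j += 1
--         chunks.append('\n'.join(cleaned[i:j]))
--         i = j
--     return chunks
-- ===== Notes on version B (the rewrite author's own statement) =====
-- stated objective: alternative
-- what changed: A interleaves stripping, blank-skipping and a flush-on-title accumulator in one stateful loop; B first builds the cleaned line list and then emits chunks as spans running from each chunk start to just before the next title line.
import Mathlib
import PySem

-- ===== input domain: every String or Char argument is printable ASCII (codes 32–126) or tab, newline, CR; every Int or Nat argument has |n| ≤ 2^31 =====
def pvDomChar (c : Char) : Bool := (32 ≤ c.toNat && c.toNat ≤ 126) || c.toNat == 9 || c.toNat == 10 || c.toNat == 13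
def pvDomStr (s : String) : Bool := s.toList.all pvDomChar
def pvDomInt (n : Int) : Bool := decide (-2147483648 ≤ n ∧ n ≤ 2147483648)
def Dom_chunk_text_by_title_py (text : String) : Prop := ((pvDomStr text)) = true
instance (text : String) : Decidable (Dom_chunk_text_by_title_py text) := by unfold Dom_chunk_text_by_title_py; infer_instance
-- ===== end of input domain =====

-- B replaces A's flush-on-title accumulator loop with a clean-then-group-by-spans
-- decomposition (same cost); objective: alternative.

-- line.isupper() for a list of chars: at least one cased char and no lowercase cased
-- char — exact on the ASCII domain, where the cased characters are exactly the letters.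
def pyStrIsupper (l : List Char) : Bool :=
  l.any PySem.Chars.isupper && l.all (fun c => !PySem.Chars.islower c)

-- len(line) < 100 and (line[0].isdigit() or line.isupper()); only evaluated on
-- non-empty lines in both programs (line[0] via pyGet?, none = IndexError, unreachable here).
def pyIsTitle (l : List Char) : Bool :=
  decide (l.length < 100) &&
    ((PySem.List.pyGet? l 0).elim false PySem.Chars.isdigit || pyStrIsupper l)

-- ===== PORT A =====
def chunk_text_by_title_py (text : String) : List String :=
  let lines := PySem.Chars.splitOn text.toList ['\n']
  let st := lines.foldl (fun (st : List (List Char) × List (List Char)) rawline =>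
      let line := PySem.Chars.strip rawline
      if line.isEmpty then st
      else if pyIsTitle line && !st.2.isEmpty then
        (st.1 ++ [PySem.Chars.join ['\n'] st.2], [line])
      else (st.1, st.2 ++ [line])) ([], [])
  let chunks := if st.2.isEmpty then st.1 else st.1 ++ [PySem.Chars.join ['\n'] st.2]
  chunks.map String.ofList

-- ===== PORT B =====
-- the grouping pass: each chunk runs from a line to just before the next title line
def chunkSpans : List (List Char) → List (List Char)
  | [] => []
  | l :: rest =>
    PySem.Chars.join ['\n'] (l :: rest.takeWhile (fun x => !pyIsTitle x)) ::
      chunkSpans (rest.dropWhile (fun x => !pyIsTitle x))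
  termination_by xs => xs.length
  decreasing_by
    exact Nat.lt_succ_of_le (List.length_dropWhile_le _ _)

def chunk_text_by_title_py_alt (text : String) : List String :=
  let cleaned := ((PySem.Chars.splitOn text.toList ['\n']).map PySem.Chars.strip).filter
      (fun s => !s.isEmpty)
  (chunkSpans cleaned).map String.ofList

-- ===== PRECONDITION & SPEC =====
def Spec_chunk_text_by_title_py (text : String) (out : List String) : Prop := out = chunk_text_by_title_py_alt text
instance (text : String) (out : List String) : Decidable (Spec_chunk_text_by_title_py text out) := by unfold Spec_chunk_text_by_title_py; infer_instance

-- ===== CLAIM (what is proved, stated in full; the proofs are below) =====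
def Claim_equal_chunk_text_by_title_py : Prop := ∀ (text : String), Dom_chunk_text_by_title_py text → Spec_chunk_text_by_title_py text (chunk_text_by_title_py text)

-- ===== LEMMAS AND PROOFS =====

-- proof-side names for A's loop body and final flush (definitionally A's code)
def stepA (st : List (List Char) × List (List Char)) (line : List Char) :
    List (List Char) × List (List Char) :=
  if pyIsTitle line && !st.2.isEmpty then
    (st.1 ++ [PySem.Chars.join ['\n'] st.2], [line])
  else (st.1, st.2 ++ [line])

def rawStepA (st : List (List Char) × List (List Char)) (rawline : List Char) :
    List (List Char) × List (List Char) :=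
  let line := PySem.Chars.strip rawline
  if line.isEmpty then st else stepA st line

def finishA (st : List (List Char) × List (List Char)) : List (List Char) :=
  if st.2.isEmpty then st.1 else st.1 ++ [PySem.Chars.join ['\n'] st.2]

-- A's strip-then-skip-blanks loop over the raw lines is the pure loop over the cleaned list
theorem foldl_strip_skip (lines : List (List Char))
    (st : List (List Char) × List (List Char)) :
    lines.foldl rawStepA st
      = ((lines.map PySem.Chars.strip).filter (fun s => !s.isEmpty)).foldl stepA st := by
  induction lines generalizing st with
  | nil => rfl
  | cons raw rest ih =>
    simp only [List.foldl_cons, List.map_cons, List.filter_cons]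
    by_cases h : (PySem.Chars.strip raw).isEmpty
    · rw [show rawStepA st raw = st by simp [rawStepA, h]]
      simp only [h, Bool.not_true, Bool.false_eq_true, if_false]
      exact ih st
    · rw [show rawStepA st raw = stepA st (PySem.Chars.strip raw) by
        simp [rawStepA, h]]
      simp only [h, Bool.not_false, if_true, List.foldl_cons]
      exact ih _

-- the invariant of A's accumulator loop over the cleaned lines, in terms of B's spans
theorem finish_foldl_eq_spans (rest : List (List Char)) (chunks cur : List (List Char))
    (h : cur ≠ []) :
    finishA (rest.foldl stepA (chunks, cur))
      = chunks ++ (PySem.Chars.join ['\n'] (cur ++ rest.takeWhile (fun x => !pyIsTitle x)) ::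
          chunkSpans (rest.dropWhile (fun x => !pyIsTitle x))) := by
  induction rest generalizing chunks cur with
  | nil =>
    simp [finishA, List.isEmpty_iff, h, chunkSpans]
  | cons l rest ih =>
    by_cases ht : pyIsTitle l
    · rw [show (l :: rest).foldl stepA (chunks, cur)
          = rest.foldl stepA (chunks ++ [PySem.Chars.join ['\n'] cur], [l]) by
        simp [stepA, ht, h]]
      rw [ih _ [l] (by simp)]
      simp [chunkSpans, ht]
    · rw [show (l :: rest).foldl stepA (chunks, cur)
          = rest.foldl stepA (chunks, cur ++ [l]) by simp [stepA, ht]]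
      rw [ih _ (cur ++ [l]) (by simp)]
      simp [ht]

-- ===== VERDICT (by name: the statement is the Claim_ definition above) =====
theorem chunk_text_by_title_py_spec : Claim_equal_chunk_text_by_title_py := by
  intro text _
  unfold Spec_chunk_text_by_title_py chunk_text_by_title_py chunk_text_by_title_py_alt
  show (finishA ((PySem.Chars.splitOn text.toList ['\n']).foldl rawStepA ([], []))).map String.ofList
      = (chunkSpans (((PySem.Chars.splitOn text.toList ['\n']).map PySem.Chars.strip).filter
          (fun s => !s.isEmpty))).map String.ofList
  rw [foldl_strip_skip]
  cases hc : (((PySem.Chars.splitOn text.toList ['\n']).map PySem.Chars.strip).filter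
      (fun s => !s.isEmpty)) with
  | nil => simp [finishA, chunkSpans]
  | cons l rest =>
    rw [List.foldl_cons, show stepA ([], []) l = ([], [l]) by simp [stepA]]
    rw [finish_foldl_eq_spans rest [] [l] (by simp)]
    simp [chunkSpans]
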